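-- pv_equiv track=rewrite | github.com/xwmtp/advent-of-code-2020 | Day09/Day09.py | find_invalid_sum_number
-- ===== SOURCE A (Python) =====
-- def find_addends(numbers, sum):
--     for i in range(len(numbers)):
--         for j in range(i+1, len(numbers)):
--             if numbers[i] + numbers[j] == sum:
--                 return numbers[i], numbers[j]
--
-- def find_invalid_sum_number(numbers, offset):
--     position = offset
--     prev_numbers = numbers[position-offset:position]
--     while(position < len(numbers)):
--         addends = find_addends(prev_numbers, numbers[position])
--         if not addends:
--             return numbers[position]
--         position+=1
--         prev_numbers = numbers[position-offset:position]
-- ===== SOURCE B (Python) =====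
-- def find_invalid_sum_number(numbers, offset):
--     for position in range(offset, len(numbers)):
--         window = numbers[position - offset:position]
--         counts = {}
--         for x in window:
--             counts[x] = counts.get(x, 0) + 1
--         t = numbers[position]
--         if not any(counts.get(t - x, 0) >= (2 if t - x == x else 1) for x in counts):
--             return numbers[position]
--     return None
-- ===== Notes on version B (the rewrite author's own statement) =====
-- stated objective: faster
-- what changed: B replaces A's nested O(offset^2) pair scan per window with a per-window hash counter: build counts of the window once, then for each key x check membership of target-x (with a count>=2 requirement when target-x==x), giving O(offset) work per position.
import Mathlib
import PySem

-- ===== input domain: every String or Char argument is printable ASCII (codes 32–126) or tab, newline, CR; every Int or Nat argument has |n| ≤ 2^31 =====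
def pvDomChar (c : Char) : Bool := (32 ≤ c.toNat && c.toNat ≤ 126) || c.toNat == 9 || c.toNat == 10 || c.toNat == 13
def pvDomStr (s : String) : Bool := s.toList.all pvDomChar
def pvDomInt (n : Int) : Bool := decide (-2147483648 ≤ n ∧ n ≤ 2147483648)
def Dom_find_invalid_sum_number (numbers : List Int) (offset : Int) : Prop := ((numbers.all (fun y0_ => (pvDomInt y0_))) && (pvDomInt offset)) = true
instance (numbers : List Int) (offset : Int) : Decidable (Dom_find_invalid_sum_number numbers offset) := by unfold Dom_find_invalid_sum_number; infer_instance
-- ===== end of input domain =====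

-- B replaces A's nested pair scan over each window by a per-window counter lookup (a faster check);
-- A = B on every input where A returns (Pre_ excludes only the inputs where A raises IndexError).

-- ===== PORT A =====
-- find_addends: for i in range(len), for j in range(i+1, len): return the first pair summing to `sum`
def find_addends (numbers : List Int) (sum : Int) : Option (Int × Int) :=
  (PySem.List.pyRange 0 (numbers.length : Int) 1).findSome? (fun i =>
    (PySem.List.pyRange (i + 1) (numbers.length : Int) 1).findSome? (fun j =>
      if PySem.List.pyGetD numbers i 0 + PySem.List.pyGetD numbers j 0 = sum
      then some (PySem.List.pyGetD numbers i 0, PySem.List.pyGetD numbers j 0)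
      else none))

-- the while-loop of A: position increases until len(numbers)
def pvALoop (numbers : List Int) (offset : Int) (position : Int) : Option Int :=
  if _h : position < (numbers.length : Int) then
    let prev_numbers := PySem.List.slice numbers (some (position - offset)) (some position)
    match find_addends prev_numbers (PySem.List.pyGetD numbers position 0) with
    | none => some (PySem.List.pyGetD numbers position 0)
    | some _ => pvALoop numbers offset (position + 1)
  else none
termination_by ((numbers.length : Int) - position).toNat
decreasing_by omega

def find_invalid_sum_number (numbers : List Int) (offset : Int) : Option Int :=
  pvALoop numbers offset offset

-- ===== PORT B =====
-- the for-loop of B: per position build a counter of the window, then check target - x membership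
def pvBLoop (numbers : List Int) (offset : Int) (position : Int) : Option Int :=
  if _h : position < (numbers.length : Int) then
    let window := PySem.List.slice numbers (some (position - offset)) (some position)
    let counts := window.foldl (fun d x => d.insert x (d.getD x 0 + 1)) (PySem.Dict.empty : PySem.Dict Int Int)
    let t := PySem.List.pyGetD numbers position 0
    if counts.keys.any (fun x => decide ((if t - x = x then (2 : Int) else 1) ≤ counts.getD (t - x) 0)) then
      pvBLoop numbers offset (position + 1)
    else some (PySem.List.pyGetD numbers position 0)
  else none
termination_by ((numbers.length : Int) - position).toNat
decreasing_by omega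

def find_invalid_sum_number_alt (numbers : List Int) (offset : Int) : Option Int :=
  pvBLoop numbers offset offset

-- ===== PRECONDITION & SPEC =====
-- Pre_ excludes exactly the inputs where A raises IndexError (numbers[position] at position < -len,
-- i.e. offset < -len(numbers)); A returns normally everywhere else, and B raises on the same inputs.
def Pre_find_invalid_sum_number (numbers : List Int) (offset : Int) : Prop :=
  -(numbers.length : Int) ≤ offset
instance (numbers : List Int) (offset : Int) : Decidable (Pre_find_invalid_sum_number numbers offset) := by unfold Pre_find_invalid_sum_number; infer_instance

def pvWitness_find_invalid_sum_number : List Int × Int := ([1, 2, 3, 6, 4], 2)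

def Spec_find_invalid_sum_number (numbers : List Int) (offset : Int) (out : Option Int) : Prop := out = find_invalid_sum_number_alt numbers offset
instance (numbers : List Int) (offset : Int) (out : Option Int) : Decidable (Spec_find_invalid_sum_number numbers offset out) := by unfold Spec_find_invalid_sum_number; infer_instance

-- ===== CLAIM (what is proved, stated in full; the proofs are below) =====
def Claim_equal_find_invalid_sum_number : Prop := ∀ (numbers : List Int) (offset : Int), Dom_find_invalid_sum_number numbers offset → Pre_find_invalid_sum_number numbers offset → Spec_find_invalid_sum_number numbers offset (find_invalid_sum_number numbers offset)

-- ===== LEMMAS AND PROOFS =====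

-- a pair of distinct positions of w summing to t
def pvHasPair (w : List Int) (t : Int) : Prop :=
  ∃ i j : Nat, i < j ∧ j < w.length ∧ w.getD i 0 + w.getD j 0 = t

-- two distinct positions holding x give count ≥ 2
lemma pv_two_le_count {w : List Int} {x : Int} {i j : Nat} (hij : i < j) (hj : j < w.length)
    (hi : w[i]'(Nat.lt_trans hij hj) = x) (hjx : w[j]'hj = x) : 2 ≤ List.count x w := by
  have hsplit : List.count x w = List.count x (w.take (i+1)) + List.count x (w.drop (i+1)) := by
    conv_lhs => rw [← List.take_append_drop (i+1) w]
    exact List.count_append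
  have h1 : x ∈ w.take (i+1) := by
    have hlen : i < (w.take (i+1)).length := by
      simp only [List.length_take]; omega
    have : (w.take (i+1))[i]'hlen = x := by rw [List.getElem_take]; exact hi
    rw [← this]; exact List.getElem_mem hlen
  have h2 : x ∈ w.drop (i+1) := by
    have hlen : j - (i+1) < (w.drop (i+1)).length := by
      simp only [List.length_drop]; omega
    have hidx : i + 1 + (j - (i+1)) = j := by omega
    have : (w.drop (i+1))[j-(i+1)]'hlen = x := by
      rw [List.getElem_drop]
      have : ∀ (k : Nat) (hk : k < w.length), k = j → w[k]'hk = x := by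
        intro k hk hkj; subst hkj; exact hjx
      exact this _ (by omega) hidx
    rw [← this]; exact List.getElem_mem hlen
  have c1 := List.count_pos_iff.mpr h1
  have c2 := List.count_pos_iff.mpr h2
  omega

-- count ≥ 2 gives two distinct positions holding x
lemma pv_exists_two_idx {w : List Int} {x : Int} (h : 2 ≤ List.count x w) :
    ∃ i j : Nat, i < j ∧ j < w.length ∧ w.getD i 0 = x ∧ w.getD j 0 = x := by
  induction w with
  | nil => simp at h
  | cons a r ih =>
    by_cases hax : a = x
    · have h1 : 0 < List.count x r := by
        subst hax
        rw [List.count_cons_self] at h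
        omega
      obtain ⟨n, hn, he⟩ := List.getElem_of_mem (List.count_pos_iff.mp h1)
      refine ⟨0, n+1, n.succ_pos, by simpa using hn, by simpa using hax, ?_⟩
      rw [List.getD_cons_succ, List.getD_eq_getElem r 0 hn]; exact he
    · have h2 : 2 ≤ List.count x r := by
        have hne : (a == x) = false := beq_eq_false_iff_ne.mpr hax
        rw [List.count_cons, hne] at h
        simpa using h
      obtain ⟨i, j, hij, hj, hxi, hxj⟩ := ih h2
      exact ⟨i+1, j+1, by omega, by simpa using hj,
        by rw [List.getD_cons_succ]; exact hxi, by rw [List.getD_cons_succ]; exact hxj⟩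

-- the bridge: a distinct-position pair exists iff some window element x has t - x present
-- (twice when t - x = x)
lemma pvHasPair_iff_counter (w : List Int) (t : Int) :
    pvHasPair w t ↔ ∃ x ∈ w, (if t - x = x then (2:Int) else 1) ≤ (List.count (t - x) w : Int) := by
  constructor
  · rintro ⟨i, j, hij, hj, hsum⟩
    have hi : i < w.length := Nat.lt_trans hij hj
    refine ⟨w.getD i 0, by rw [List.getD_eq_getElem w 0 hi]; exact List.getElem_mem hi, ?_⟩
    have hyx : t - w.getD i 0 = w.getD j 0 := by omega
    rw [hyx]
    split_ifs with hcond
    · -- t - x = x: the two positions both hold x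
      have hx2 : 2 ≤ List.count (w.getD j 0) w := by
        apply pv_two_le_count hij hj
        · rw [← List.getD_eq_getElem w 0 hi]; omega
        · rw [← List.getD_eq_getElem w 0 hj]
      exact_mod_cast hx2
    · have hmem : w.getD j 0 ∈ w := by
        rw [List.getD_eq_getElem w 0 hj]; exact List.getElem_mem hj
      have := List.count_pos_iff.mpr hmem
      exact_mod_cast this
  · rintro ⟨x, hxw, hcnt⟩
    by_cases hcond : t - x = x
    · rw [if_pos hcond] at hcnt
      have h2 : 2 ≤ List.count (t - x) w := by exact_mod_cast hcnt
      rw [hcond] at h2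
      obtain ⟨i, j, hij, hj, hxi, hxj⟩ := pv_exists_two_idx h2
      exact ⟨i, j, hij, hj, by rw [hxi, hxj]; omega⟩
    · rw [if_neg hcond] at hcnt
      have hmem : t - x ∈ w := List.count_pos_iff.mp (by exact_mod_cast hcnt)
      obtain ⟨i, hi, hxi⟩ := List.getElem_of_mem hxw
      obtain ⟨j, hj, hxj⟩ := List.getElem_of_mem hmem
      have hne : i ≠ j := by
        intro hijeq; apply hcond
        subst hijeq; rw [hxi] at hxj; omega
      rcases Nat.lt_or_ge i j with hlt | hge
      · refine ⟨i, j, hlt, hj, ?_⟩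
        rw [List.getD_eq_getElem w 0 hi, List.getD_eq_getElem w 0 hj, hxi, hxj]; ring
      · have hlt : j < i := by omega
        refine ⟨j, i, hlt, hi, ?_⟩
        rw [List.getD_eq_getElem w 0 hj, List.getD_eq_getElem w 0 hi, hxj, hxi]; ring

-- A-side characterisation of the nested scan
lemma find_addends_eq_none_iff (w : List Int) (t : Int) :
    find_addends w t = none ↔ ¬ pvHasPair w t := by
  unfold find_addends
  rw [List.findSome?_eq_none_iff]
  constructor
  · intro h hp
    obtain ⟨i, j, hij, hj, hsum⟩ := hp
    have hi : i < w.length := Nat.lt_trans hij hj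
    have hmi : (i : Int) ∈ PySem.List.pyRange 0 (w.length : Int) 1 :=
      PySem.List.mem_pyRange_one.mpr ⟨by positivity, by exact_mod_cast hi⟩
    have h1 := h (i : Int) hmi
    rw [List.findSome?_eq_none_iff] at h1
    have hmj : (j : Int) ∈ PySem.List.pyRange ((i : Int) + 1) (w.length : Int) 1 :=
      PySem.List.mem_pyRange_one.mpr ⟨by exact_mod_cast hij, by exact_mod_cast hj⟩
    have h2 := h1 (j : Int) hmj
    have hgi : PySem.List.pyGetD w (i : Int) 0 = w.getD i 0 := by
      rw [PySem.List.pyGetD_eq_getElem w 0 (by positivity) (by exact_mod_cast hi)]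
      rw [List.getD_eq_getElem w 0 (by simpa using hi)]
      simp
    have hgj : PySem.List.pyGetD w (j : Int) 0 = w.getD j 0 := by
      rw [PySem.List.pyGetD_eq_getElem w 0 (by positivity) (by exact_mod_cast hj)]
      rw [List.getD_eq_getElem w 0 (by simpa using hj)]
      simp
    rw [hgi, hgj, if_pos hsum] at h2
    simp at h2
  · intro hnp i hmi
    rw [List.findSome?_eq_none_iff]
    intro j hmj
    rw [PySem.List.mem_pyRange_one] at hmi hmj
    split_ifs with hsum
    · exfalso; apply hnp
      refine ⟨i.toNat, j.toNat, by omega, by omega, ?_⟩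
      rw [List.getD_eq_getElem w 0 (by omega), List.getD_eq_getElem w 0 (by omega)]
      rw [PySem.List.pyGetD_eq_getElem w 0 (by omega) (by omega),
          PySem.List.pyGetD_eq_getElem w 0 (by omega) (by omega)] at hsum
      exact hsum
    · rfl

-- B-side characterisation of the counter check
lemma counter_check_iff (w : List Int) (t : Int) :
    ((w.foldl (fun d x => d.insert x (d.getD x 0 + 1)) (PySem.Dict.empty : PySem.Dict Int Int)).keys.any
      (fun x => decide ((if t - x = x then (2 : Int) else 1) ≤
        (w.foldl (fun d x => d.insert x (d.getD x 0 + 1)) (PySem.Dict.empty : PySem.Dict Int Int)).getD (t - x) 0)) = true)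
    ↔ pvHasPair w t := by
  rw [PySem.Dict.foldl_insert_getD_add_one_eq_counter, List.any_eq_true, pvHasPair_iff_counter]
  simp only [PySem.Dict.keys_counter, PySem.Dict.getD_counter, decide_eq_true_eq]
  constructor
  · rintro ⟨x, hx, hc⟩; exact ⟨x, (PySem.Set.mem_ofList w x).mp hx, hc⟩
  · rintro ⟨x, hx, hc⟩; exact ⟨x, (PySem.Set.mem_ofList w x).mpr hx, hc⟩

-- the per-iteration checks agree
lemma pv_check_eq (w : List Int) (t : Int) :
    find_addends w t = none ↔
    ((w.foldl (fun d x => d.insert x (d.getD x 0 + 1)) (PySem.Dict.empty : PySem.Dict Int Int)).keys.any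
      (fun x => decide ((if t - x = x then (2 : Int) else 1) ≤
        (w.foldl (fun d x => d.insert x (d.getD x 0 + 1)) (PySem.Dict.empty : PySem.Dict Int Int)).getD (t - x) 0)) = false) := by
  rw [find_addends_eq_none_iff, ← counter_check_iff w t]
  rw [Bool.eq_false_iff]

-- the two loops agree position by position
lemma pv_loops_eq (numbers : List Int) (offset position : Int) :
    pvALoop numbers offset position = pvBLoop numbers offset position := by
  induction position using pvALoop.induct numbers offset with
  | case1 p h prev heq =>
    rw [pvALoop, pvBLoop]
    simp only [h, dif_pos]
    rw [heq]
    rw [(pv_check_eq (PySem.List.slice numbers (some (p - offset)) (some p)) (PySem.List.pyGetD numbers p 0)).mp heq]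
    simp
  | case2 p h prev val heq ih =>
    rw [pvALoop, pvBLoop]
    simp only [h, dif_pos]
    rw [heq]
    have hne : find_addends (PySem.List.slice numbers (some (p - offset)) (some p)) (PySem.List.pyGetD numbers p 0) ≠ none := by
      rw [heq]; simp
    have hb : ((PySem.List.slice numbers (some (p - offset)) (some p)).foldl (fun d x => d.insert x (d.getD x 0 + 1)) (PySem.Dict.empty : PySem.Dict Int Int)).keys.any
        (fun x => decide ((if PySem.List.pyGetD numbers p 0 - x = x then (2 : Int) else 1) ≤
          ((PySem.List.slice numbers (some (p - offset)) (some p)).foldl (fun d x => d.insert x (d.getD x 0 + 1)) (PySem.Dict.empty : PySem.Dict Int Int)).getD (PySem.List.pyGetD numbers p 0 - x) 0)) = true := by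
      by_contra hc
      rw [Bool.not_eq_true] at hc
      exact hne ((pv_check_eq _ _).mpr hc)
    rw [hb]
    simpa using ih
  | case3 p h => rw [pvALoop, pvBLoop]; simp [h]

-- ===== VERDICT (by name: the statement is the Claim_ definition above) =====
theorem find_invalid_sum_number_spec : Claim_equal_find_invalid_sum_number := by
  intro numbers offset _ _
  unfold Spec_find_invalid_sum_number find_invalid_sum_number find_invalid_sum_number_alt
  exact pv_loops_eq numbers offset offset
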